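-- pv_equiv track=rewrite | github.com/KEETHAPRIYAN-CSE/Flames_with_Fun | flames.py | calculate_flames
-- ===== SOURCE A (Python) =====
-- def calculate_flames(name1, name2):
--     n1 = list(name1.replace(" ", "").lower())
--     n2 = list(name2.replace(" ", "").lower())
--
--     for char in n1[:]:
--         if char in n2:
--             n1.remove(char)
--             n2.remove(char)
--
--     count = len(n1) + len(n2)
--
--     flames = ['Friends', 'Love', 'Affection', 'Marriage', 'Enemy', 'Siblings']
--     index = 0
--
--     while len(flames) > 1:
--         index = (index + count - 1) % len(flames)
--         flames.pop(index)
--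
--     return flames[0]
-- ===== SOURCE B (Python) =====
-- def calculate_flames(name1, name2):
--     s1 = name1.replace(" ", "").lower()
--     s2 = name2.replace(" ", "").lower()
--     # leftover letters after cancelling common occurrences = sum of count differences
--     count = sum(abs(s1.count(c) - s2.count(c)) for c in set(s1 + s2))
--     flames = ['Friends', 'Love', 'Affection', 'Marriage', 'Enemy', 'Siblings']
--     # Josephus recurrence: survivor index of the round-robin elimination, no list mutation
--     j = 0
--     for i in range(2, 7):
--         j = (j + count) % i
--     return flames[j]
-- ===== Notes on version B (the rewrite author's own statement) =====
-- stated objective: faster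
-- what changed: The pairwise remove()-based cancellation of common letters is replaced by summing per-character count differences, and the while-loop that simulates round-robin elimination by popping from the 6-element flames list is replaced by the Josephus survivor recurrence j=(j+count)%i for i in 2..6 on an unmutated list.
import Mathlib
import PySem

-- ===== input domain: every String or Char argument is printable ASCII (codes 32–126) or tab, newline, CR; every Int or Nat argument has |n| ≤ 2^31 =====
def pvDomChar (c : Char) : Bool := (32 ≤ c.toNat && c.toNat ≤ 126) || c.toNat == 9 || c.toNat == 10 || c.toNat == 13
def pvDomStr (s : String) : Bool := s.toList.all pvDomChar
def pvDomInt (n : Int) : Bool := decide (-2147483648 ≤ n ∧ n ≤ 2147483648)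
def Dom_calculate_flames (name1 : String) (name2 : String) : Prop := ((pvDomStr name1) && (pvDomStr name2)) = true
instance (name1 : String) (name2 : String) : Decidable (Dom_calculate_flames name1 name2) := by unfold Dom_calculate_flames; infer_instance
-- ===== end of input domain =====

-- B replaces A's pairwise cancel-and-remove loop by per-character count differences and A's
-- mutate-and-pop elimination of the 6-element list by the Josephus survivor recurrence (faster: no quadratic remove loop).

-- ===== PORT A =====

/-- One step of A's removal loop: `if char in n2: n1.remove(char); n2.remove(char)`.
    The `.getD` defaults are unreachable: `remove?` is `none` only when the element is absent;
    presence in `st.2` is the guard, presence in `st.1` is a loop invariant (and `List.erase`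
    of an absent element is the identity, matching the `getD` default anyway). -/
def pvRemoveStep (st : List Char × List Char) (c : Char) : List Char × List Char :=
  if st.2.contains c then
    ((PySem.List.remove? st.1 c).getD st.1, (PySem.List.remove? st.2 c).getD st.2)
  else st

/-- A's `while len(flames) > 1` loop; `fuel` (called with the initial length) only makes the
    recursion structural — the loop removes one element per iteration, so it never runs out.
    The `none` branch of `pop?` is unreachable: `0 ≤ i < len(flames)` after the `%`. -/
def pvFlamesLoop : Nat → Int → List String → Int → List String
  | 0, _, flames, _ => flames
  | fuel + 1, count, flames, index =>
    if 1 < flames.length then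
      let i := PySem.Int.mod (index + count - 1) (flames.length : Int)
      match PySem.List.pop? flames i with
      | some r => pvFlamesLoop fuel count r.2 i
      | none => flames
    else flames

def calculate_flames (name1 : String) (name2 : String) : String :=
  let n1 := (PySem.Str.lower (PySem.Str.replace name1 " " "")).toList
  let n2 := (PySem.Str.lower (PySem.Str.replace name2 " " "")).toList
  let fin := n1.foldl pvRemoveStep (n1, n2)
  let count : Int := ((fin.1.length + fin.2.length : Nat) : Int)
  let flames := ["Friends", "Love", "Affection", "Marriage", "Enemy", "Siblings"]
  -- return flames[0]; the loop always ends with one survivor, so the default is unreachable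
  (PySem.List.pyGet? (pvFlamesLoop flames.length count flames 0) 0).getD ""

-- ===== PORT B =====

def calculate_flames_alt (name1 : String) (name2 : String) : String :=
  let s1 := (PySem.Str.lower (PySem.Str.replace name1 " " "")).toList
  let s2 := (PySem.Str.lower (PySem.Str.replace name2 " " "")).toList
  -- sum over set(s1 + s2): the summation is order-independent
  let count : Int := ((PySem.Set.ofList (s1 ++ s2)).map
      (fun c => |((s1.count c : Int) - (s2.count c : Int))|)).sum
  let flames := ["Friends", "Love", "Affection", "Marriage", "Enemy", "Siblings"]
  let j := (PySem.List.pyRange 2 7 1).foldl (fun j i => PySem.Int.mod (j + count) i) 0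
  -- flames[j]: 0 ≤ j < 6 after the final `% 6`, so the default is unreachable
  (PySem.List.pyGet? flames j).getD ""

-- ===== PRECONDITION & SPEC =====
def Spec_calculate_flames (name1 : String) (name2 : String) (out : String) : Prop := out = calculate_flames_alt name1 name2
instance (name1 : String) (name2 : String) (out : String) : Decidable (Spec_calculate_flames name1 name2 out) := by unfold Spec_calculate_flames; infer_instance

-- ===== CLAIM (what is proved, stated in full; the proofs are below) =====
def Claim_equal_calculate_flames : Prop := ∀ (name1 : String) (name2 : String), Dom_calculate_flames name1 name2 → Spec_calculate_flames name1 name2 (calculate_flames name1 name2)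

-- ===== LEMMAS AND PROOFS =====

/-- The removal step is a conditional double `List.erase`. -/
theorem pvRemoveStep_eq (st : List Char × List Char) (c : Char) :
    pvRemoveStep st c = if c ∈ st.2 then (st.1.erase c, st.2.erase c) else st := by
  by_cases h2 : c ∈ st.2
  · by_cases h1 : c ∈ st.1
    · simp [pvRemoveStep, h2, PySem.List.remove?_eq_some_erase st.1 c h1,
        PySem.List.remove?_eq_some_erase st.2 c h2]
    · simp [pvRemoveStep, h2, (PySem.List.remove?_eq_none_iff st.1 c).2 h1,
        PySem.List.remove?_eq_some_erase st.2 c h2, List.erase_of_not_mem h1]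
  · simp [pvRemoveStep, h2]

theorem pvInterCons (b s : Multiset Char) (c : Char) (hc : c ∈ b) :
    b ∩ (c ::ₘ s) = c ::ₘ (b.erase c ∩ s) := by
  ext x
  by_cases hx : x = c
  · subst hx
    have := Multiset.one_le_count_iff_mem.2 hc
    simp [Multiset.count_inter, Multiset.count_cons_self, Multiset.count_erase_self]
    omega
  · simp [Multiset.count_inter, Multiset.count_cons_of_ne hx, Multiset.count_erase_of_ne hx]

theorem pvInterConsNot (b s : Multiset Char) (c : Char) (hc : c ∉ b) :
    b ∩ (c ::ₘ s) = b ∩ s := by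
  ext x
  by_cases hx : x = c
  · subst hx
    simp [Multiset.count_inter, Multiset.count_eq_zero.2 hc]
  · simp [Multiset.count_inter, Multiset.count_cons_of_ne hx]

theorem pvSubConsNot (b s : Multiset Char) (c : Char) (hc : c ∉ b) :
    b - (c ::ₘ s) = b - s := by
  ext x
  by_cases hx : x = c
  · subst hx
    simp [Multiset.count_sub, Multiset.count_eq_zero.2 hc]
  · simp [Multiset.count_sub, Multiset.count_erase_of_ne hx]

/-- Multiset view of the removal loop: the second list loses the processed characters,
    the first loses their common part with `b`. -/
theorem pvRemoveLoop_multiset (cs : List Char) (a b : List Char) :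
    (((cs.foldl pvRemoveStep (a, b)).1 : List Char) : Multiset Char)
        = (↑a : Multiset Char) - ((↑b : Multiset Char) ∩ (↑cs : Multiset Char))
    ∧ (((cs.foldl pvRemoveStep (a, b)).2 : List Char) : Multiset Char)
        = (↑b : Multiset Char) - (↑cs : Multiset Char) := by
  induction cs generalizing a b with
  | nil => simp
  | cons c cs ih =>
    rw [List.foldl_cons, pvRemoveStep_eq]
    by_cases hc : c ∈ b
    · simp only [hc, if_pos]
      obtain ⟨ih1, ih2⟩ := ih (a.erase c) (b.erase c)
      constructor
      · rw [ih1]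
        rw [show ((c :: cs : List Char) : Multiset Char) = c ::ₘ (↑cs : Multiset Char) from rfl,
          pvInterCons _ _ _ (by exact_mod_cast hc), Multiset.sub_cons, Multiset.coe_erase,
          Multiset.coe_erase]
      · rw [ih2]
        rw [show ((c :: cs : List Char) : Multiset Char) = c ::ₘ (↑cs : Multiset Char) from rfl,
          Multiset.sub_cons, Multiset.coe_erase]
    · simp only [hc, if_neg, not_false_iff]
      obtain ⟨ih1, ih2⟩ := ih a b
      have hcb : c ∉ (↑b : Multiset Char) := by exact_mod_cast hc
      constructor
      · rw [ih1, show ((c :: cs : List Char) : Multiset Char) = c ::ₘ (↑cs : Multiset Char) from rfl,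
          pvInterConsNot _ _ _ hcb]
      · rw [ih2, show ((c :: cs : List Char) : Multiset Char) = c ::ₘ (↑cs : Multiset Char) from rfl,
          pvSubConsNot _ _ _ hcb]

/-- Card of a multiset as a count sum over any finset containing its support. -/
theorem pvCardSum (s : Multiset Char) (T : Finset Char) (h : ∀ x, x ∈ s → x ∈ T) :
    Multiset.card s = ∑ x ∈ T, s.count x := by
  rw [← Multiset.toFinset_sum_count_eq]
  refine Finset.sum_subset (fun x hx => h x (Multiset.mem_toFinset.1 hx)) ?_
  intro x _ hx
  exact Multiset.count_eq_zero.2 (fun h' => hx (Multiset.mem_toFinset.2 h'))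

/-- A's leftover-letter count equals B's sum of per-character count differences. -/
theorem pvCount_eq (a b : List Char) :
    (((a.foldl pvRemoveStep (a, b)).1.length + (a.foldl pvRemoveStep (a, b)).2.length : Nat) : Int)
      = ((PySem.Set.ofList (a ++ b)).map
          (fun c => |((a.count c : Int) - (b.count c : Int))|)).sum := by
  obtain ⟨h1, h2⟩ := pvRemoveLoop_multiset a a b
  have hl1 : (a.foldl pvRemoveStep (a, b)).1.length
      = Multiset.card ((↑a : Multiset Char) - ((↑b : Multiset Char) ∩ (↑a : Multiset Char))) := by
    rw [← h1]; simp
  have hl2 : (a.foldl pvRemoveStep (a, b)).2.length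
      = Multiset.card ((↑b : Multiset Char) - (↑a : Multiset Char)) := by
    rw [← h2]; simp
  rw [hl1, hl2]
  have hnodup := PySem.Set.nodup_ofList (α := Char) (a ++ b)
  have hT : (PySem.Set.ofList (a ++ b)).toFinset = (a ++ b).toFinset := by
    ext x
    simp [List.mem_toFinset, PySem.Set.mem_ofList]
  rw [← List.sum_toFinset _ hnodup, hT]
  set T := (a ++ b).toFinset with hTdef
  have m1 : ∀ x, x ∈ (↑a : Multiset Char) - ((↑b : Multiset Char) ∩ (↑a : Multiset Char)) → x ∈ T := by
    intro x hx
    have hxa : x ∈ (↑a : Multiset Char) := Multiset.mem_of_le tsub_le_self hx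
    simp only [hTdef, List.mem_toFinset, List.mem_append]
    exact Or.inl (by exact_mod_cast hxa)
  have m2 : ∀ x, x ∈ (↑b : Multiset Char) - (↑a : Multiset Char) → x ∈ T := by
    intro x hx
    have hxb : x ∈ (↑b : Multiset Char) := Multiset.mem_of_le tsub_le_self hx
    simp only [hTdef, List.mem_toFinset, List.mem_append]
    exact Or.inr (by exact_mod_cast hxb)
  rw [pvCardSum _ T m1, pvCardSum _ T m2]
  push_cast
  rw [← Finset.sum_add_distrib]
  refine Finset.sum_congr rfl ?_
  intro x _
  simp only [Multiset.count_sub, Multiset.count_inter, Multiset.coe_count]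
  rcases abs_cases ((a.count x : Int) - (b.count x : Int)) with ⟨he, _⟩ | ⟨he, _⟩ <;> rw [he] <;> omega

/-- The elimination loop only sees `count` through `% len` with `len ≤ 6`, hence through `count % 60`. -/
theorem pvFlamesLoop_congr (fuel : Nat) (c c' : Int) (h : c % 60 = c' % 60) :
    ∀ (flames : List String) (idx : Int), flames.length ≤ 6 →
      pvFlamesLoop fuel c flames idx = pvFlamesLoop fuel c' flames idx := by
  induction fuel with
  | zero => intro flames idx _; rfl
  | succ fuel ih =>
    intro flames idx hlen
    by_cases hl : 1 < flames.length
    · have hi : PySem.Int.mod (idx + c - 1) (flames.length : Int)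
          = PySem.Int.mod (idx + c' - 1) (flames.length : Int) := by
        rw [PySem.Int.mod_eq_emod_of_pos (by exact_mod_cast Nat.lt_of_lt_of_le Nat.zero_lt_one hl.le),
            PySem.Int.mod_eq_emod_of_pos (by exact_mod_cast Nat.lt_of_lt_of_le Nat.zero_lt_one hl.le)]
        have h2 : 2 ≤ flames.length := hl
        set n := flames.length with hn
        interval_cases n <;> omega
      simp only [pvFlamesLoop, hl, if_pos]
      rw [← hi]
      cases hp : PySem.List.pop? flames (PySem.Int.mod (idx + c - 1) (flames.length : Int)) with
      | none => rfl
      | some r =>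
        apply ih
        have := PySem.List.length_of_pop?_eq_some _ hp
        omega
    · simp only [pvFlamesLoop, hl, if_neg, not_false_iff]

/-- B's Josephus recurrence also only sees `count` through `count % 60`. -/
theorem pvJos_congr (c c' : Int) (h : c % 60 = c' % 60) :
    (PySem.List.pyRange 2 7 1).foldl (fun j i => PySem.Int.mod (j + c) i) 0
      = (PySem.List.pyRange 2 7 1).foldl (fun j i => PySem.Int.mod (j + c') i) 0 := by
  have hr : PySem.List.pyRange 2 7 1 = [2, 3, 4, 5, 6] := by decide
  rw [hr]
  have h2 : ∀ j : ℤ, (j + c) % 2 = (j + c') % 2 := by omega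
  have h3 : ∀ j : ℤ, (j + c) % 3 = (j + c') % 3 := by omega
  have h4 : ∀ j : ℤ, (j + c) % 4 = (j + c') % 4 := by omega
  have h5 : ∀ j : ℤ, (j + c) % 5 = (j + c') % 5 := by omega
  have h6 : ∀ j : ℤ, (j + c) % 6 = (j + c') % 6 := by omega
  simp only [List.foldl_cons, List.foldl_nil,
    PySem.Int.mod_eq_emod_of_pos (show (0:ℤ) < 2 by norm_num),
    PySem.Int.mod_eq_emod_of_pos (show (0:ℤ) < 3 by norm_num),
    PySem.Int.mod_eq_emod_of_pos (show (0:ℤ) < 4 by norm_num),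
    PySem.Int.mod_eq_emod_of_pos (show (0:ℤ) < 5 by norm_num),
    PySem.Int.mod_eq_emod_of_pos (show (0:ℤ) < 6 by norm_num)]
  rw [h2, h3, h4, h5, h6]

set_option maxHeartbeats 1000000 in
/-- For each residue mod 60, A's simulated elimination and B's Josephus recurrence agree. -/
theorem pvBase : ∀ m : Nat, m < 60 →
    (PySem.List.pyGet? (pvFlamesLoop 6 (m : Int)
        ["Friends", "Love", "Affection", "Marriage", "Enemy", "Siblings"] 0) 0).getD ""
    = (PySem.List.pyGet? ["Friends", "Love", "Affection", "Marriage", "Enemy", "Siblings"]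
        ((PySem.List.pyRange 2 7 1).foldl (fun j i => PySem.Int.mod (j + (m : Int)) i) 0)).getD "" := by
  decide

/-- The finishing phases agree for every nonnegative count. -/
theorem pvFinish (n : Nat) :
    (PySem.List.pyGet? (pvFlamesLoop 6 (n : Int)
        ["Friends", "Love", "Affection", "Marriage", "Enemy", "Siblings"] 0) 0).getD ""
    = (PySem.List.pyGet? ["Friends", "Love", "Affection", "Marriage", "Enemy", "Siblings"]
        ((PySem.List.pyRange 2 7 1).foldl (fun j i => PySem.Int.mod (j + (n : Int)) i) 0)).getD "" := by
  have hc : (n : Int) % 60 = ((n % 60 : Nat) : Int) % 60 := by omega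
  rw [pvFlamesLoop_congr 6 (n : Int) ((n % 60 : Nat) : Int) hc _ 0 (by norm_num),
      pvJos_congr (n : Int) ((n % 60 : Nat) : Int) hc]
  exact pvBase (n % 60) (Nat.mod_lt n (by norm_num))

-- ===== VERDICT (by name: the statement is the Claim_ definition above) =====
theorem calculate_flames_spec : Claim_equal_calculate_flames := by
  unfold Claim_equal_calculate_flames
  intro name1 name2 _
  unfold Spec_calculate_flames calculate_flames calculate_flames_alt
  simp only [← pvCount_eq, List.length_cons, List.length_nil]
  exact pvFinish _
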